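-- pv_equiv track=rewrite | github.com/phyzical/advent-of-code | 2017/09/9.2.py | solve
-- ===== SOURCE A (Python) =====
-- def solve(input):
--     result = ''
--     instructionLine = input
--     removing = False
--     index = 0
--     cancel = False
--     count = 0
--     while index < len(instructionLine):
--         currentChar = instructionLine[index]
--         if removing == True:
--             instructionLine = instructionLine[:index] + instructionLine[index+1:]
--             if cancel == False and currentChar == '>':
--                 removing = False
--             elif cancel == False and currentChar != '!':
--                 count += 1
--         else:
--             if cancel == False and currentChar == '<':
--                 removing = True
--                 instructionLine = instructionLine[:index] + instructionLine[index+1:]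
--             else:
--                 index += 1
--         if currentChar == '!':
--             cancel = cancel == False
--         else:
--             cancel = False
--     return count
-- ===== SOURCE B (Python) =====
-- def solve(input):
--     removing = False
--     cancel = False
--     count = 0
--     for ch in input:
--         if removing:
--             if not cancel and ch == '>':
--                 removing = False
--             elif not cancel and ch != '!':
--                 count += 1
--         else:
--             if not cancel and ch == '<':
--                 removing = True
--         cancel = (ch == '!') and not cancel
--     return count
-- ===== Notes on version B (the rewrite author's own statement) =====
-- stated objective: faster
-- what changed: B replaces A's while-loop that repeatedly rebuilds the string by slicing out deleted characters with a single linear scan carrying (removing, cancel, count) state and no string mutation.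
import Mathlib
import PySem

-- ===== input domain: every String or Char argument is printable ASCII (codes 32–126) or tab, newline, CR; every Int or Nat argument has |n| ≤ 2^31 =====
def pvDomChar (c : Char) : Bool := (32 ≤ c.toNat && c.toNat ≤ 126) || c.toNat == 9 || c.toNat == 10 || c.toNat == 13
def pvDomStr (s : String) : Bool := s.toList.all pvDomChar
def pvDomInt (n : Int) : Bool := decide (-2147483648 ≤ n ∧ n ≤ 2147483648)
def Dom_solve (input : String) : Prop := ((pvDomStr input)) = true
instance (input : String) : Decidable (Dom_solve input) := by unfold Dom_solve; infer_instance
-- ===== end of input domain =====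

-- B replaces A's while-loop that repeatedly rebuilds the string by slicing out deleted
-- characters with a single linear scan carrying (removing, cancel, count); same return value.

-- ===== PORT A =====
-- A's while loop: the string is mutated by deleting chars; termination measure length - index.
def solveLoop (cs : List Char) (removing cancel : Bool) (index : Nat) (count : Int) : Int :=
  if h : index < cs.length then
    let c := cs[index]
    if removing then
      let cs' := cs.take index ++ cs.drop (index + 1)
      if cancel = false ∧ c = '>' then
        solveLoop cs' false (if c = '!' then !cancel else false) index count
      else if cancel = false ∧ c ≠ '!' then
        solveLoop cs' true (if c = '!' then !cancel else false) index (count + 1)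
      else
        solveLoop cs' true (if c = '!' then !cancel else false) index count
    else
      if cancel = false ∧ c = '<' then
        solveLoop (cs.take index ++ cs.drop (index + 1)) true
          (if c = '!' then !cancel else false) index count
      else
        solveLoop cs removing (if c = '!' then !cancel else false) (index + 1) count
  else count
termination_by cs.length - index
decreasing_by all_goals simp_all; omega

def solve (input : String) : Int := solveLoop input.toList false false 0 0

-- ===== PORT B =====
def altStep (s : Bool × Bool × Int) (ch : Char) : Bool × Bool × Int :=
  let removing := s.1
  let cancel := s.2.1
  let count := s.2.2
  let removing' :=
    if removing then (if !cancel && ch == '>' then false else true)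
    else (if !cancel && ch == '<' then true else false)
  let count' :=
    if removing && !cancel && ch != '>' && ch != '!' then count + 1 else count
  (removing', (ch == '!') && !cancel, count')

def solve_alt (input : String) : Int :=
  (input.toList.foldl altStep (false, false, 0)).2.2

-- ===== PRECONDITION & SPEC =====
def Spec_solve (input : String) (out : Int) : Prop := out = solve_alt input
instance (input : String) (out : Int) : Decidable (Spec_solve input out) := by unfold Spec_solve; infer_instance

-- ===== CLAIM (what is proved, stated in full; the proofs are below) =====
def Claim_equal_solve : Prop := ∀ (input : String), Dom_solve input → Spec_solve input (solve input)

-- ===== LEMMAS AND PROOFS =====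

-- dropping past the deletion point of A's slice gives the original tail
theorem drop_take_append_drop (l : List Char) (i : Nat) (h : i < l.length) :
    List.drop i (List.take i l ++ List.drop (i + 1) l) = List.drop (i + 1) l := by
  rw [List.drop_append]
  simp [Nat.le_of_lt h]

-- A's loop equals B's fold over the yet-unprocessed suffix
theorem solveLoop_eq_foldl (cs : List Char) (removing cancel : Bool) (index : Nat) (count : Int) :
    solveLoop cs removing cancel index count
      = ((List.drop index cs).foldl altStep (removing, cancel, count)).2.2 := by
  induction cs, removing, cancel, index, count using solveLoop.induct with
  | case1 cs cancel index count h c cs' hc ih =>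
      rw [solveLoop, List.drop_eq_getElem_cons h, List.foldl_cons]
      rw [drop_take_append_drop cs index h] at ih
      have e : cs[index] = '>' := hc.2
      simp_all [altStep]
      exact ih
  | case2 cs cancel index count h c cs' hc1 hc2 ih =>
      rw [solveLoop, List.drop_eq_getElem_cons h, List.foldl_cons]
      rw [drop_take_append_drop cs index h] at ih
      have e1 : ¬ cs[index] = '>' := fun hgt => hc1 ⟨hc2.1, hgt⟩
      have e2 : ¬ cs[index] = '!' := hc2.2
      have e2' : (cs[index] == '!') = false := by simp [e2]
      simp only [altStep, e2']
      simp_all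
      exact ih
  | case3 cs cancel index count h c cs' hc1 hc2 ih =>
      rw [solveLoop, List.drop_eq_getElem_cons h, List.foldl_cons]
      rw [drop_take_append_drop cs index h] at ih
      by_cases hcl : cancel = true
      · simp_all [altStep]
        exact ih
      · have e : cs[index] = '!' := by
          by_contra hne
          exact hc2 ⟨by simpa using hcl, hne⟩
        simp_all [altStep]
        exact ih
  | case4 cs removing cancel index count h c hr hc ih =>
      rw [solveLoop, List.drop_eq_getElem_cons h, List.foldl_cons]
      rw [drop_take_append_drop cs index h] at ih
      have e : cs[index] = '<' := hc.2
      simp_all [altStep]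
  | case5 cs removing cancel index count h c hr hc ih =>
      rw [solveLoop, List.drop_eq_getElem_cons h, List.foldl_cons]
      by_cases hcl : cancel = true
      · simp_all [altStep]
      · have e : ¬ cs[index] = '<' := fun hlt => hc ⟨by simpa using hcl, hlt⟩
        simp_all [altStep, beq_iff_eq]
        exact ih
  | case6 cs removing cancel index count h =>
      rw [solveLoop]
      simp [h, List.drop_eq_nil_of_le (Nat.le_of_not_lt h)]

-- ===== VERDICT (by name: the statement is the Claim_ definition above) =====
theorem solve_spec : Claim_equal_solve := by
  intro input _
  unfold Spec_solve solve solve_alt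
  rw [solveLoop_eq_foldl]
  simp
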